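-- pv_equiv track=rewrite | github.com/SeminKim/BOJ-practice | BOJ/2202/23291.py | move_and_linearize
-- ===== SOURCE A (Python) =====
-- def move_and_linearize(fishbowl):
--     delta = []
--     # horizontal
--     for floor in range(len(fishbowl)):
--         temp = [0 for _ in range(len(fishbowl[floor]))]
--         for i in range(len(fishbowl[floor]) - 1):
--             diff = int((fishbowl[floor][i + 1] - fishbowl[floor][i]) / 5)
--             temp[i] += diff
--             temp[i + 1] -= diff
--         delta.append(temp)
--     # vertical
--     for pos in range(len(fishbowl[1])):
--         for floor in range(len(fishbowl) - 1):
--             diff = int((fishbowl[floor + 1][pos] - fishbowl[floor][pos]) / 5)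
--             delta[floor][pos] += diff
--             delta[floor + 1][pos] -= diff
--     # apply
--     for floor in range(len(fishbowl)):
--         for i in range(len(fishbowl[floor])):
--             fishbowl[floor][i] += delta[floor][i]
--
--     new_bowl = []
--     for wow in zip(*fishbowl):
--         new_bowl.extend(wow)
--     new_bowl.extend(fishbowl[0][len(fishbowl[1]):])
--     return [new_bowl]
-- ===== SOURCE B (Python) =====
-- # B: per-cell gather instead of per-edge scatter: each new cell value is computed
-- # directly from its original neighbors (net inflow), no edge-indexed delta table.
-- # Like A it mutates fishbowl in place (rows are rewritten to the new values).
-- def move_and_linearize(fishbowl):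
--     L = len(fishbowl[1])
--     n = len(fishbowl)
--
--     def d(a, b):
--         return int((a - b) / 5)
--
--     new = []
--     for fl, row in enumerate(fishbowl):
--         m = len(row)
--         nr = []
--         for i, v in enumerate(row):
--             c = v
--             if i + 1 < m:
--                 c += d(row[i + 1], v)
--             if i > 0:
--                 c -= d(v, row[i - 1])
--             if i < L:
--                 if fl + 1 < n:
--                     c += d(fishbowl[fl + 1][i], v)
--                 if fl > 0:
--                     c -= d(v, fishbowl[fl - 1][i])
--             nr.append(c)
--         new.append(nr)
--     for fl in range(n):
--         fishbowl[fl][:] = new[fl]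
--     out = [x for col in zip(*new) for x in col]
--     out.extend(new[0][L:])
--     return [out]
-- ===== Notes on version B (the rewrite author's own statement) =====
-- stated objective: alternative
-- what changed: The edge-scatter diffusion with a mutable per-edge delta table is replaced by a per-cell gather: each new cell value is computed directly from its original neighbors in one map over the grid, eliminating the delta table; the linearization is kept identical. Both A and B mutate fishbowl in place; the equivalence is about the return value (B performs the same final mutation).
import Mathlib
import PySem

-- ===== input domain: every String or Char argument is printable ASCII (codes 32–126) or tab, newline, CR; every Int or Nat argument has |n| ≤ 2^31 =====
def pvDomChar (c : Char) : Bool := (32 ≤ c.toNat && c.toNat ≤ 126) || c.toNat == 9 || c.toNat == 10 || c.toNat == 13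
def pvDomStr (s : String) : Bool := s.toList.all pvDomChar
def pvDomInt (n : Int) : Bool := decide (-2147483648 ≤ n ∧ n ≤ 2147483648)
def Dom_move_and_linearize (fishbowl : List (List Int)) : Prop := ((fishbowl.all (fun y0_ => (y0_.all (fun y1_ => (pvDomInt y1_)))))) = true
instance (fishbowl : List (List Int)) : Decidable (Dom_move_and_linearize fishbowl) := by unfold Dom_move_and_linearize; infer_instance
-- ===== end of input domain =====

-- B replaces A's per-edge scatter (mutable delta table) by a per-cell gather from original
-- neighbors; same linearization. Both Pythons mutate fishbowl in place (same final contents);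
-- the theorems below are about the RETURN value.

-- ===== PORT A =====

-- int((a - b) / 5): float true division then truncation toward zero; on Dom (|a|,|b| ≤ 2^31)
-- the float quotient truncates exactly like t-division, so Int.tdiv is exact here.
def pvDD (a b : Int) : Int := (a - b).tdiv 5

-- All indexing below is with in-range indices wherever A returns (Pre_), so List.getD is exact.
def pvGet2 (g : List (List Int)) (f p : Nat) : Int := (g.getD f []).getD p 0

def pvSet2 (g : List (List Int)) (f p : Nat) (v : Int) : List (List Int) :=
  g.set f ((g.getD f []).set p v)

-- body of A's inner horizontal loop: temp[i] += diff; temp[i+1] -= diff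
def pvHStep (row : List Int) (temp : List Int) (i : Nat) : List Int :=
  let diff := pvDD (row.getD (i + 1) 0) (row.getD i 0)
  let t1 := temp.set i (temp.getD i 0 + diff)
  t1.set (i + 1) (t1.getD (i + 1) 0 - diff)

-- one horizontal pass: temp = [0]*len(row); for i in range(len(row)-1): …
def pvHRow (row : List Int) : List Int :=
  (List.range (row.length - 1)).foldl (pvHStep row) (List.replicate row.length 0)

-- body of A's inner vertical loop: delta[floor][pos] += diff; delta[floor+1][pos] -= diff
def pvVStep (fb : List (List Int)) (pos : Nat) (d : List (List Int)) (floor : Nat) :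
    List (List Int) :=
  let diff := pvDD (pvGet2 fb (floor + 1) pos) (pvGet2 fb floor pos)
  let d1 := pvSet2 d floor pos (pvGet2 d floor pos + diff)
  pvSet2 d1 (floor + 1) pos (pvGet2 d1 (floor + 1) pos - diff)

-- body of A's apply loop: fishbowl[floor][i] += delta[floor][i]
def pvAStep (delta2 : List (List Int)) (floor : Nat) (b : List (List Int)) (i : Nat) :
    List (List Int) :=
  pvSet2 b floor i (pvGet2 b floor i + pvGet2 delta2 floor i)

-- zip(*g) flattened (zip truncates to the shortest row), then the tail g[0][L:], wrapped in [·].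
-- Shared by both ports: A's extend-loop and B's comprehension compute this identically.
def pvLinearize (g : List (List Int)) (L : Nat) : List (List Int) :=
  let m := ((g.map List.length).min?).getD 0
  let nb := ((List.range m).map (fun j => g.map (fun r => r.getD j 0))).foldl
    (fun acc w => acc ++ w) []
  [nb ++ (g.getD 0 []).drop L]

def move_and_linearize (fishbowl : List (List Int)) : List (List Int) :=
  -- horizontal: delta.append(temp) per floor
  let delta := (List.range fishbowl.length).foldl
    (fun d floor => d ++ [pvHRow (fishbowl.getD floor [])]) []
  -- vertical: for pos in range(len(fishbowl[1])): for floor in range(len(fishbowl)-1): …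
  let delta2 := (List.range (fishbowl.getD 1 []).length).foldl
    (fun d pos => (List.range (fishbowl.length - 1)).foldl (pvVStep fishbowl pos) d) delta
  -- apply (in-place mutation of fishbowl; modelled functionally)
  let bowl := (List.range fishbowl.length).foldl
    (fun b floor => (List.range ((b.getD floor []).length)).foldl (pvAStep delta2 floor) b)
    fishbowl
  pvLinearize bowl ((bowl.getD 1 []).length)

-- ===== PORT B =====

-- B's per-cell gather: net change of cell (fl, i) computed from its original neighbors.
def pvCell (fishbowl : List (List Int)) (L n : Nat) (fl : Int) (row : List Int) (i v : Int) :
    Int :=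
  let m : Int := row.length
  let c := v
  let c := if i + 1 < m then c + pvDD (PySem.List.pyGetD row (i + 1) 0) v else c
  let c := if 0 < i then c - pvDD v (PySem.List.pyGetD row (i - 1) 0) else c
  if i < (L : Int) then
    let c := if fl + 1 < (n : Int) then
        c + pvDD (PySem.List.pyGetD (PySem.List.pyGetD fishbowl (fl + 1) []) i 0) v else c
    if 0 < fl then
      c - pvDD v (PySem.List.pyGetD (PySem.List.pyGetD fishbowl (fl - 1) []) i 0)
    else c
  else c

def move_and_linearize_alt (fishbowl : List (List Int)) : List (List Int) :=
  let L := (fishbowl.getD 1 []).length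
  let n := fishbowl.length
  let new := (PySem.List.enumerate fishbowl 0).map (fun fr =>
    (PySem.List.enumerate fr.2 0).map (fun iv => pvCell fishbowl L n fr.1 fr.2 iv.1 iv.2))
  pvLinearize new L

-- ===== PRECONDITION & SPEC =====
-- Pre_ is exactly where the Python A returns: with fewer than two rows fishbowl[1] raises
-- IndexError, and with any row shorter than len(fishbowl[1]) the vertical loop raises IndexError.
def Pre_move_and_linearize (fishbowl : List (List Int)) : Prop :=
  2 ≤ fishbowl.length ∧ ∀ row ∈ fishbowl, (fishbowl.getD 1 []).length ≤ row.length

instance (fishbowl : List (List Int)) : Decidable (Pre_move_and_linearize fishbowl) := by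
  unfold Pre_move_and_linearize; infer_instance

def pvWitness_move_and_linearize : List (List Int) := [[7, -3, 11], [2, 9], [5, 0]]

def Spec_move_and_linearize (fishbowl : List (List Int)) (out : List (List Int)) : Prop :=
  out = move_and_linearize_alt fishbowl
instance (fishbowl : List (List Int)) (out : List (List Int)) :
    Decidable (Spec_move_and_linearize fishbowl out) := by
  unfold Spec_move_and_linearize; infer_instance

-- ===== CLAIM (what is proved, stated in full; the proofs are below) =====
def Claim_equal_move_and_linearize : Prop :=
  ∀ (fishbowl : List (List Int)), Dom_move_and_linearize fishbowl →
    Pre_move_and_linearize fishbowl →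
    Spec_move_and_linearize fishbowl (move_and_linearize fishbowl)

-- ===== LEMMAS AND PROOFS =====

-- row length of a grid (rows past the end count as empty, matching pvGet2)
def pvRlen (g : List (List Int)) (f : Nat) : Nat := (g.getD f []).length

theorem pvGetD_set {α : Type} (d : α) (xs : List α) (i j : Nat) (v : α) :
    (xs.set i v).getD j d = if i = j ∧ j < xs.length then v else xs.getD j d := by
  simp [List.getD_eq_getElem?_getD, List.getElem?_set]
  split_ifs with h1 h2 h3 h4 <;> simp_all

theorem pvLength_set2 (g : List (List Int)) (f p : Nat) (v : Int) :
    (pvSet2 g f p v).length = g.length := by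
  simp [pvSet2]

theorem pvRlen_set2 (g : List (List Int)) (f p : Nat) (v : Int) (f' : Nat) :
    pvRlen (pvSet2 g f p v) f' = pvRlen g f' := by
  simp only [pvRlen, pvSet2]
  rw [pvGetD_set]
  split_ifs with h <;> simp_all

theorem pvGet2_set2 (g : List (List Int)) (f p : Nat) (v : Int) (f' p' : Nat) :
    pvGet2 (pvSet2 g f p v) f' p' =
      if f = f' ∧ p = p' ∧ f < g.length ∧ p < pvRlen g f then v else pvGet2 g f' p' := by
  simp only [pvGet2, pvSet2, pvRlen]
  rw [pvGetD_set]
  by_cases h1 : f = f' ∧ f' < g.length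
  · obtain ⟨rfl, hlt⟩ := h1
    rw [if_pos ⟨rfl, hlt⟩, pvGetD_set]
    by_cases h2 : p = p' ∧ p' < (g.getD f []).length
    · obtain ⟨rfl, hp⟩ := h2
      rw [if_pos ⟨rfl, hp⟩, if_pos ⟨rfl, rfl, hlt, hp⟩]
    · rw [if_neg h2, if_neg (by rintro ⟨-, rfl, -, hp⟩; exact h2 ⟨rfl, hp⟩)]
  · rw [if_neg h1, if_neg (by rintro ⟨rfl, -, hf, -⟩; exact h1 ⟨rfl, hf⟩)]

theorem pvGetD_replicate (n i : Nat) : (List.replicate n (0:Int)).getD i 0 = 0 := by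
  simp [List.getD_eq_getElem?_getD, List.getElem?_replicate]
  split_ifs <;> rfl

-- the net horizontal change of cell i of a row, as a closed formula
def pvHVal (row : List Int) (i : Nat) : Int :=
  (if i + 1 ≤ row.length - 1 then pvDD (row.getD (i + 1) 0) (row.getD i 0) else 0)
  - (if 1 ≤ i ∧ i ≤ row.length - 1 then pvDD (row.getD i 0) (row.getD (i - 1) 0) else 0)

theorem pvHRow_aux (row : List Int) (k : Nat) (hk : k ≤ row.length - 1) :
    ((List.range k).foldl (pvHStep row) (List.replicate row.length 0)).length = row.length ∧
    ∀ i, ((List.range k).foldl (pvHStep row) (List.replicate row.length 0)).getD i 0 =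
      (if i + 1 ≤ k then pvDD (row.getD (i + 1) 0) (row.getD i 0) else 0)
      - (if 1 ≤ i ∧ i ≤ k then pvDD (row.getD i 0) (row.getD (i - 1) 0) else 0) := by
  induction k with
  | zero =>
    refine ⟨by simp, fun i => ?_⟩
    rw [if_neg (by omega), if_neg (by omega)]
    simpa using pvGetD_replicate row.length i
  | succ k ih =>
    obtain ⟨hl, hv⟩ := ih (by omega)
    rw [List.range_succ, List.foldl_append, List.foldl_cons, List.foldl_nil]
    set P := (List.range k).foldl (pvHStep row) (List.replicate row.length 0) with hP
    have hkm : k + 1 < row.length := by omega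
    refine ⟨by simp [pvHStep, hl], fun i => ?_⟩
    simp only [pvHStep]
    rw [pvGetD_set]
    simp only [List.length_set, hl]
    rw [pvGetD_set, pvGetD_set]
    simp only [hl, hv]
    split_ifs <;> (try omega) <;> simp_all
    all_goals try ring
    all_goals have h9 : i - 1 = k := by omega
    all_goals rw [h9]

theorem pvHRow_length (row : List Int) : (pvHRow row).length = row.length :=
  (pvHRow_aux row (row.length - 1) le_rfl).1

theorem pvHRow_getD (row : List Int) (i : Nat) : (pvHRow row).getD i 0 = pvHVal row i :=
  (pvHRow_aux row (row.length - 1) le_rfl).2 i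

theorem pvFoldl_append_map (l : List Nat) (g : Nat → List Int) (acc : List (List Int)) :
    l.foldl (fun d x => d ++ [g x]) acc = acc ++ l.map g := by
  induction l generalizing acc with
  | nil => simp
  | cons x t ih => simp [ih]

-- the net vertical change of cell (f, p), as a closed formula
def pvVVal (fb : List (List Int)) (f p : Nat) : Int :=
  (if f + 1 ≤ fb.length - 1 then pvDD (pvGet2 fb (f + 1) p) (pvGet2 fb f p) else 0)
  - (if 1 ≤ f ∧ f ≤ fb.length - 1 then pvDD (pvGet2 fb f p) (pvGet2 fb (f - 1) p) else 0)

set_option maxRecDepth 8192 in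
theorem pvVPass_aux (fb d : List (List Int)) (pos : Nat)
    (hlen : d.length = fb.length) (hrl : ∀ f, pvRlen d f = pvRlen fb f)
    (hpos : ∀ f < fb.length, pos < pvRlen fb f) (k : Nat) (hk : k ≤ fb.length - 1) :
    ((List.range k).foldl (pvVStep fb pos) d).length = fb.length ∧
    (∀ f, pvRlen ((List.range k).foldl (pvVStep fb pos) d) f = pvRlen fb f) ∧
    ∀ f q, pvGet2 ((List.range k).foldl (pvVStep fb pos) d) f q =
      pvGet2 d f q + (if q = pos then
        (if f + 1 ≤ k then pvDD (pvGet2 fb (f + 1) pos) (pvGet2 fb f pos) else 0)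
        - (if 1 ≤ f ∧ f ≤ k then pvDD (pvGet2 fb f pos) (pvGet2 fb (f - 1) pos) else 0)
      else 0) := by
  induction k with
  | zero =>
    refine ⟨hlen ▸ rfl, fun f => hrl f, fun f q => ?_⟩
    split_ifs <;> (try (exfalso; omega)) <;> simp
  | succ k ih =>
    obtain ⟨hl, hr, hv⟩ := ih (by omega)
    rw [List.range_succ, List.foldl_append, List.foldl_cons, List.foldl_nil]
    set Q := (List.range k).foldl (pvVStep fb pos) d with hQ
    have hk1 : k < fb.length := by omega
    have hk2 : k + 1 < fb.length := by omega
    have hp1 : pos < pvRlen fb k := hpos k hk1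
    have hp2 : pos < pvRlen fb (k + 1) := hpos (k + 1) hk2
    refine ⟨by simp [pvVStep, pvLength_set2, hl], ?_, fun f q => ?_⟩
    · intro f; simp only [pvVStep, pvRlen_set2]; exact hr f
    · simp only [pvVStep]
      rw [pvGet2_set2]
      simp only [pvLength_set2, pvRlen_set2, hl, hr]
      rw [pvGet2_set2, pvGet2_set2]
      simp only [pvLength_set2, pvRlen_set2, hl, hr, hv]
      clear hQ ih
      split_ifs <;> (try (exfalso; omega))
      all_goals try ring
      all_goals (obtain ⟨rfl, rfl, -, -⟩ := ‹_ = _ ∧ _ = _ ∧ _ ∧ _›)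
      all_goals try ring
      all_goals (try (have h9 : k + 1 - 1 = k := by omega; rw [h9]))
      all_goals (try (simp only [Nat.add_sub_cancel_left, Nat.add_sub_cancel]))
      all_goals try ring

theorem pvVert_aux (fb d : List (List Int)) (L : Nat)
    (hlen : d.length = fb.length) (hrl : ∀ f, pvRlen d f = pvRlen fb f)
    (hL : ∀ f < fb.length, L ≤ pvRlen fb f) (p : Nat) (hp : p ≤ L) :
    ((List.range p).foldl
        (fun d pos => (List.range (fb.length - 1)).foldl (pvVStep fb pos) d) d).length
      = fb.length ∧
    (∀ f, pvRlen ((List.range p).foldl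
        (fun d pos => (List.range (fb.length - 1)).foldl (pvVStep fb pos) d) d) f
      = pvRlen fb f) ∧
    ∀ f q, pvGet2 ((List.range p).foldl
        (fun d pos => (List.range (fb.length - 1)).foldl (pvVStep fb pos) d) d) f q =
      pvGet2 d f q + (if q < p then pvVVal fb f q else 0) := by
  induction p with
  | zero =>
    refine ⟨hlen, hrl, fun f q => ?_⟩
    simp
  | succ p ih =>
    obtain ⟨hlp, hrp, hvp⟩ := ih (by omega)
    rw [List.range_succ, List.foldl_append, List.foldl_cons, List.foldl_nil]
    set R := (List.range p).foldl
      (fun d pos => (List.range (fb.length - 1)).foldl (pvVStep fb pos) d) d with hR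
    obtain ⟨hl2, hr2, hv2⟩ := pvVPass_aux fb R p hlp hrp
      (fun f hf => lt_of_lt_of_le (by omega) (hL f hf)) (fb.length - 1) le_rfl
    refine ⟨hl2, hr2, fun f q => ?_⟩
    rw [hv2, hvp]
    unfold pvVVal
    by_cases hq : q = p
    · subst hq
      split_ifs <;> (try (exfalso; omega))
      all_goals ring
    · split_ifs <;> (try (exfalso; omega))
      all_goals ring

theorem pvApply_row_aux (D b : List (List Int)) (floor : Nat) (k : Nat)
    (hk : k ≤ pvRlen b floor) :
    ((List.range k).foldl (pvAStep D floor) b).length = b.length ∧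
    (∀ f, pvRlen ((List.range k).foldl (pvAStep D floor) b) f = pvRlen b f) ∧
    ∀ f i, pvGet2 ((List.range k).foldl (pvAStep D floor) b) f i =
      pvGet2 b f i + (if f = floor ∧ i < k ∧ f < b.length then pvGet2 D f i else 0) := by
  induction k with
  | zero =>
    refine ⟨rfl, fun f => rfl, fun f i => ?_⟩
    rw [if_neg (by omega), add_zero]
    rfl
  | succ k ih =>
    obtain ⟨hl, hr, hv⟩ := ih (by omega)
    rw [List.range_succ, List.foldl_append, List.foldl_cons, List.foldl_nil]
    set B := (List.range k).foldl (pvAStep D floor) b with hB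
    have hkr : k < pvRlen b floor := by omega
    refine ⟨by simp [pvAStep, pvLength_set2, hl],
      fun f => by simp only [pvAStep, pvRlen_set2]; exact hr f, fun f i => ?_⟩
    simp only [pvAStep]
    rw [pvGet2_set2]
    simp only [hl, hr, hv]
    split_ifs <;> (try (exfalso; omega))
    all_goals try ring
    all_goals (obtain ⟨rfl, rfl, -, -⟩ := ‹_ = _ ∧ _ = _ ∧ _ ∧ _›)
    all_goals (try (split_ifs <;> (try (exfalso; omega))))
    all_goals ring

theorem pvApply_aux (D fb : List (List Int)) (k : Nat) (hk : k ≤ fb.length) :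
    ((List.range k).foldl
        (fun b floor => (List.range (pvRlen b floor)).foldl (pvAStep D floor) b) fb).length
      = fb.length ∧
    (∀ f, pvRlen ((List.range k).foldl
        (fun b floor => (List.range (pvRlen b floor)).foldl (pvAStep D floor) b) fb) f
      = pvRlen fb f) ∧
    ∀ f i, pvGet2 ((List.range k).foldl
        (fun b floor => (List.range (pvRlen b floor)).foldl (pvAStep D floor) b) fb) f i =
      pvGet2 fb f i + (if f < k ∧ i < pvRlen fb f then pvGet2 D f i else 0) := by
  induction k with
  | zero =>
    refine ⟨rfl, fun f => rfl, fun f i => ?_⟩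
    rw [if_neg (by omega), add_zero]
    rfl
  | succ k ih =>
    obtain ⟨hl, hr, hv⟩ := ih (by omega)
    rw [List.range_succ, List.foldl_append, List.foldl_cons, List.foldl_nil]
    set B := (List.range k).foldl
      (fun b floor => (List.range (pvRlen b floor)).foldl (pvAStep D floor) b) fb with hB
    obtain ⟨hl2, hr2, hv2⟩ := pvApply_row_aux D B k (pvRlen B k) le_rfl
    refine ⟨hl2.trans hl, fun f => (hr2 f).trans (hr f), fun f i => ?_⟩
    rw [hv2, hv]
    simp only [hl, hr]
    by_cases hf : f = k
    · subst hf
      split_ifs <;> (try (exfalso; omega))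
      all_goals ring
    · split_ifs <;> (try (exfalso; omega))
      all_goals ring

-- B-side: the cell formula pvCell agrees with original-value + hval + vval
theorem pvCell_eq (fb : List (List Int)) (f i : Nat) (hf : f < fb.length)
    (hi : i < pvRlen fb f) (hL : (fb.getD 1 []).length ≤ pvRlen fb f) :
    pvCell fb ((fb.getD 1 []).length) fb.length (f : Int) (fb.getD f [])
        (i : Int) ((fb.getD f []).getD i 0) =
      pvGet2 fb f i + pvHVal (fb.getD f []) i
        + (if i < (fb.getD 1 []).length then pvVVal fb f i else 0) := by
  have hi' : i < (fb.getD f []).length := hi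
  simp only [pvCell, pvHVal, pvVVal, pvGet2, pvRlen]
  split_ifs <;> (try (exfalso; omega))
  all_goals (try rw [show ((i : Nat) : Int) - 1 = (((i - 1 : Nat)) : Int) from by omega])
  all_goals (try rw [show ((f : Nat) : Int) - 1 = (((f - 1 : Nat)) : Int) from by omega])
  all_goals (try rw [show ((i : Nat) : Int) + 1 = (((i + 1 : Nat)) : Int) from by push_cast; ring])
  all_goals (try rw [show ((f : Nat) : Int) + 1 = (((f + 1 : Nat)) : Int) from by push_cast; ring])
  all_goals try simp only [PySem.List.pyGetD_natCast]
  all_goals ring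

-- the B port's grid, row by row
theorem pvAlt_grid (fb : List (List Int)) :
    ((PySem.List.enumerate fb 0).map (fun fr =>
      (PySem.List.enumerate fr.2 0).map (fun iv =>
        pvCell fb ((fb.getD 1 []).length) fb.length fr.1 fr.2 iv.1 iv.2))).length
      = fb.length ∧
    ∀ f, f < fb.length →
      ((PySem.List.enumerate fb 0).map (fun fr =>
        (PySem.List.enumerate fr.2 0).map (fun iv =>
          pvCell fb ((fb.getD 1 []).length) fb.length fr.1 fr.2 iv.1 iv.2))).getD f []
      = (List.range (pvRlen fb f)).map (fun (i : Nat) =>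
          pvCell fb ((fb.getD 1 []).length) fb.length (f : Int) (fb.getD f [])
            (i : Int) ((fb.getD f []).getD i 0)) := by
  constructor
  · simp [PySem.List.length_enumerate]
  · intro f hf
    have hf' : f < ((PySem.List.enumerate fb 0).map (fun fr =>
        (PySem.List.enumerate fr.2 0).map (fun iv =>
          pvCell fb ((fb.getD 1 []).length) fb.length fr.1 fr.2 iv.1 iv.2))).length := by
      simpa [PySem.List.length_enumerate] using hf
    rw [List.getD_eq_getElem _ _ hf', List.getElem_map,
      PySem.List.getElem_enumerate _ _ _ (by simpa [PySem.List.length_enumerate] using hf)]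
    have hfb : fb.getD f [] = fb[f] := List.getD_eq_getElem fb [] hf
    apply List.ext_getElem
    · rw [List.length_map, List.length_map, PySem.List.length_enumerate, List.length_range]
      unfold pvRlen
      rw [hfb]
    · intro k h1 h2
      have hk : k < fb[f].length := by
        simpa [PySem.List.length_enumerate] using h1
      rw [List.getElem_map, List.getElem_map,
        PySem.List.getElem_enumerate _ _ _ (by simpa [PySem.List.length_enumerate] using hk),
        List.getElem_range]
      simp only [hfb, zero_add, List.getD_eq_getElem fb[f] 0 hk]

-- names for the intermediate grids of the two ports (proof-side only; definitionally
-- equal to the corresponding subterms of the ports)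
def pvDeltaA (fb : List (List Int)) : List (List Int) :=
  (List.range fb.length).foldl (fun d floor => d ++ [pvHRow (fb.getD floor [])]) []

def pvDelta2A (fb : List (List Int)) : List (List Int) :=
  (List.range (fb.getD 1 []).length).foldl
    (fun d pos => (List.range (fb.length - 1)).foldl (pvVStep fb pos) d) (pvDeltaA fb)

def pvBowlA (fb : List (List Int)) : List (List Int) :=
  (List.range fb.length).foldl
    (fun b floor => (List.range ((b.getD floor []).length)).foldl
      (pvAStep (pvDelta2A fb) floor) b) fb

def pvNewB (fb : List (List Int)) : List (List Int) :=
  (PySem.List.enumerate fb 0).map (fun fr =>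
    (PySem.List.enumerate fr.2 0).map (fun iv =>
      pvCell fb ((fb.getD 1 []).length) fb.length fr.1 fr.2 iv.1 iv.2))

theorem pvDeltaA_eq (fb : List (List Int)) :
    pvDeltaA fb = (List.range fb.length).map (fun f => pvHRow (fb.getD f [])) := by
  unfold pvDeltaA
  rw [pvFoldl_append_map]
  simp

theorem pvDeltaA_len (fb : List (List Int)) : (pvDeltaA fb).length = fb.length := by
  rw [pvDeltaA_eq]; simp

theorem pvDeltaA_rlen (fb : List (List Int)) (f : Nat) :
    pvRlen (pvDeltaA fb) f = pvRlen fb f := by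
  unfold pvRlen
  rw [pvDeltaA_eq]
  by_cases hf : f < fb.length
  · rw [List.getD_eq_getElem _ _ (by simpa using hf), List.getElem_map, List.getElem_range,
      pvHRow_length, List.getD_eq_getElem _ _ hf]
  · rw [List.getD_eq_default _ _ (by simpa using hf), List.getD_eq_default _ _ (by omega)]

theorem pvDeltaA_get (fb : List (List Int)) (f q : Nat) (hf : f < fb.length) :
    pvGet2 (pvDeltaA fb) f q = pvHVal (fb.getD f []) q := by
  unfold pvGet2
  rw [pvDeltaA_eq]
  have hfl : f < ((List.range fb.length).map (fun f => pvHRow (fb.getD f []))).length := by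
    simpa using hf
  rw [List.getD_eq_getElem ((List.range fb.length).map (fun f => pvHRow (fb.getD f []))) [] hfl,
    List.getElem_map, List.getElem_range, pvHRow_getD]

theorem pvDelta2A_facts (fb : List (List Int))
    (hL : ∀ f < fb.length, (fb.getD 1 []).length ≤ pvRlen fb f) :
    (pvDelta2A fb).length = fb.length ∧ (∀ f, pvRlen (pvDelta2A fb) f = pvRlen fb f) ∧
    ∀ f q, f < fb.length → pvGet2 (pvDelta2A fb) f q =
      pvHVal (fb.getD f []) q +
        (if q < (fb.getD 1 []).length then pvVVal fb f q else 0) := by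
  obtain ⟨a, b, c⟩ := pvVert_aux fb (pvDeltaA fb) ((fb.getD 1 []).length)
    (pvDeltaA_len fb) (pvDeltaA_rlen fb) hL ((fb.getD 1 []).length) le_rfl
  refine ⟨a, b, fun f q hf => ?_⟩
  rw [show pvGet2 (pvDelta2A fb) f q = pvGet2 ((List.range ((fb.getD 1 []).length)).foldl
    (fun d pos => (List.range (fb.length - 1)).foldl (pvVStep fb pos) d) (pvDeltaA fb)) f q
    from rfl, c f q, pvDeltaA_get fb f q hf]

theorem pvBowlA_facts (fb : List (List Int)) :
    (pvBowlA fb).length = fb.length ∧ (∀ f, pvRlen (pvBowlA fb) f = pvRlen fb f) ∧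
    ∀ f i, pvGet2 (pvBowlA fb) f i =
      pvGet2 fb f i +
        (if f < fb.length ∧ i < pvRlen fb f then pvGet2 (pvDelta2A fb) f i else 0) :=
  pvApply_aux (pvDelta2A fb) fb fb.length le_rfl

theorem pvNewB_len (fb : List (List Int)) : (pvNewB fb).length = fb.length :=
  (pvAlt_grid fb).1

theorem pvNewB_row (fb : List (List Int)) (f : Nat) (hf : f < fb.length) :
    (pvNewB fb).getD f [] = (List.range (pvRlen fb f)).map (fun (i : Nat) =>
      pvCell fb ((fb.getD 1 []).length) fb.length (f : Int) (fb.getD f [])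
        (i : Int) ((fb.getD f []).getD i 0)) :=
  (pvAlt_grid fb).2 f hf

theorem pvGrids_eq (fb : List (List Int)) (hpre : Pre_move_and_linearize fb) :
    pvBowlA fb = pvNewB fb := by
  obtain ⟨h2, hrows⟩ := hpre
  have hL : ∀ f < fb.length, (fb.getD 1 []).length ≤ pvRlen fb f := by
    intro f hf
    have hm : fb.getD f [] ∈ fb := by
      rw [List.getD_eq_getElem fb [] hf]; exact List.getElem_mem hf
    exact hrows _ hm
  obtain ⟨hlb, hrb, hvb⟩ := pvBowlA_facts fb
  obtain ⟨-, -, hvd⟩ := pvDelta2A_facts fb hL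
  apply List.ext_getElem
  · rw [hlb, pvNewB_len]
  · intro f h1 h2'
    have hf : f < fb.length := by rwa [hlb] at h1
    rw [show (pvBowlA fb)[f] = (pvBowlA fb).getD f [] from (List.getD_eq_getElem _ _ h1).symm,
      show (pvNewB fb)[f] = (pvNewB fb).getD f [] from (List.getD_eq_getElem _ _ h2').symm,
      pvNewB_row fb f hf]
    apply List.ext_getElem
    · rw [List.length_map, List.length_range]; exact hrb f
    · intro i hi1 hi2
      have hi : i < pvRlen fb f := by rwa [List.length_map, List.length_range] at hi2
      rw [List.getElem_map, List.getElem_range,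
        show ((pvBowlA fb).getD f [])[i] = ((pvBowlA fb).getD f []).getD i 0 from
          (List.getD_eq_getElem _ _ hi1).symm,
        show ((pvBowlA fb).getD f []).getD i 0 = pvGet2 (pvBowlA fb) f i from rfl,
        hvb f i, if_pos ⟨hf, hi⟩, hvd f i hf, pvCell_eq fb f i hf hi (hL f hf)]
      ring

-- ===== VERDICT (by name: the statement is the Claim_ definition above) =====
theorem move_and_linearize_spec : Claim_equal_move_and_linearize := by
  intro fb _ hpre
  unfold Spec_move_and_linearize
  have hA : move_and_linearize fb =
      pvLinearize (pvBowlA fb) (((pvBowlA fb).getD 1 []).length) := rfl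
  have hB : move_and_linearize_alt fb =
      pvLinearize (pvNewB fb) ((fb.getD 1 []).length) := rfl
  rw [hA, hB, pvGrids_eq fb hpre]
  obtain ⟨h2, hrows⟩ := hpre
  have h1 : (1 : Nat) < fb.length := by omega
  rw [show ((pvNewB fb).getD 1 []).length = (fb.getD 1 []).length from by
    rw [pvNewB_row fb 1 h1, List.length_map, List.length_range]; rfl]
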